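-- pv_equiv track=rewrite | github.com/WooHooDai/linkding-cn | bookmarks/utils.py | canonicalize_domain_filter_value
-- ===== SOURCE A (Python) =====
-- def canonicalize_domain_filter_value(value: str) -> str:
--     if not value:
--         return ""
--
--     parts = [part.strip().lower() for part in value.split("|")]
--     parts = [part for part in parts if part]
--     if not parts:
--         return ""
--
--     if len(parts) == 1:
--         return parts[0]
--
--     exact_parts = [part for part in parts if not part.startswith(".")]
--     subdomain_parts = [part for part in parts if part.startswith(".")]
--     ordered_parts = sorted(exact_parts) + sorted(subdomain_parts)
--     return " | ".join(ordered_parts)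
-- ===== SOURCE B (Python) =====
-- def _precedes(a, b):
--     if a.startswith(".") != b.startswith("."):
--         return b.startswith(".")
--     return a < b
--
--
-- def canonicalize_domain_filter_value(value: str) -> str:
--     if not value:
--         return ""
--     parts = []
--     for raw in value.split("|"):
--         p = raw.strip().lower()
--         if p:
--             parts.append(p)
--     out = ""
--     while parts:
--         best = parts[0]
--         rest = []
--         for q in parts[1:]:
--             if _precedes(q, best):
--                 rest.append(best)
--                 best = q
--             else:
--                 rest.append(q)
--         out = best if not out else out + " | " + best
--         parts = rest
--     return out
-- ===== Notes on version B (the rewrite author's own statement) =====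
-- stated objective: alternative
-- what changed: Replaces library sorts over two partitioned lists (plus a length-1 special case) with an explicit selection loop: repeatedly scan for the minimal remaining part under the composite domain order and append it directly to the output string, so no partition, no library sort and no final join are used.
import Mathlib
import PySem

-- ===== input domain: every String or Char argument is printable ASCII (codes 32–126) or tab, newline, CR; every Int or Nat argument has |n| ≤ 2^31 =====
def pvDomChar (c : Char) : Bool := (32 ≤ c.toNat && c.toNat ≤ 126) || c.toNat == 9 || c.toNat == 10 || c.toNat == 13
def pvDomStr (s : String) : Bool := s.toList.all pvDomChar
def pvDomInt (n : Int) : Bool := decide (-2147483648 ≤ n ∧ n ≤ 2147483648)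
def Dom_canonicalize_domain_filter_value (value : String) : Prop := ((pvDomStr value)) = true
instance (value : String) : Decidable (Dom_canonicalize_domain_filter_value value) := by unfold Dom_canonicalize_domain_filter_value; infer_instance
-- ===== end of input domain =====

-- B replaces A's partition-into-two-lists + two library sorts + join (and the length-1
-- special case) by an explicit selection loop: repeatedly scan for the minimal remaining
-- part under the composite order and append it directly to the output string (alternative).


-- ===== PORT A =====
def canonicalize_domain_filter_value (value : String) : String :=
  if value = "" then ""
  else
    let parts := ((PySem.Str.split? value "|").getD []).map
      (fun part => PySem.Str.lower (PySem.Str.strip part))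
    let parts := parts.filter (fun part => !(part == ""))
    if parts = [] then ""
    else if parts.length = 1 then (PySem.List.pyGet? parts 0).getD ""
    else
      let exact_parts := parts.filter (fun part => !(PySem.Str.startswith part "."))
      let subdomain_parts := parts.filter (fun part => PySem.Str.startswith part ".")
      let ordered_parts := PySem.List.sorted exact_parts (fun x => x) ++
        PySem.List.sorted subdomain_parts (fun x => x)
      PySem.Str.join " | " ordered_parts

-- ===== PORT B =====
-- helper _precedes(a, b) of Source B
def pvPrecedes (a b : String) : Bool :=
  if PySem.Str.startswith a "." ≠ PySem.Str.startswith b "." then PySem.Str.startswith b "."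
  else decide (a < b)

-- Python's 'x + y' on str, exact: a string is its list of code points
def pvCat (a b : String) : String := String.ofList (a.toList ++ b.toList)

-- the inner 'for q in parts[1:]' loop of Source B, carrying (best, rest)
def pvScan (best : String) : List String → String × List String
  | [] => (best, [])
  | q :: qs =>
    if pvPrecedes q best then
      let r := pvScan q qs
      (r.1, best :: r.2)
    else
      let r := pvScan best qs
      (r.1, q :: r.2)

theorem pvScan_len (l : List String) : ∀ best, ((pvScan best l).2).length = l.length := by
  induction l with
  | nil => intro best; rfl
  | cons q qs ih =>
    intro best
    by_cases h : pvPrecedes q best = true <;> simp [pvScan, h, ih]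

-- the 'while parts:' loop of Source B
def pvWhile (out : String) (parts : List String) : String :=
  match parts with
  | [] => out
  | p :: ps =>
    let r := pvScan p ps
    pvWhile (if out = "" then r.1 else pvCat (pvCat out " | ") r.1) r.2
termination_by parts.length
decreasing_by simpa [pvScan_len] using Nat.lt_succ_self ps.length

def canonicalize_domain_filter_value_alt (value : String) : String :=
  if value = "" then ""
  else
    let parts := ((PySem.Str.split? value "|").getD []).foldl
      (fun acc raw =>
        let p := PySem.Str.lower (PySem.Str.strip raw)
        if p = "" then acc else acc ++ [p]) []
    pvWhile "" parts

-- ===== PRECONDITION & SPEC =====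
def Spec_canonicalize_domain_filter_value (value : String) (out : String) : Prop := out = canonicalize_domain_filter_value_alt value
instance (value : String) (out : String) : Decidable (Spec_canonicalize_domain_filter_value value out) := by unfold Spec_canonicalize_domain_filter_value; infer_instance

-- ===== CLAIM (what is proved, stated in full; the proofs are below) =====
def Claim_equal_canonicalize_domain_filter_value : Prop := ∀ (value : String), Dom_canonicalize_domain_filter_value value → Spec_canonicalize_domain_filter_value value (canonicalize_domain_filter_value value)

-- ===== LEMMAS AND PROOFS =====

def pvFlag (p : String) : Bool := PySem.Str.startswith p "."

theorem pvPrecedes_iff (a b : String) :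
    pvPrecedes a b = true ↔ ((pvFlag a = false ∧ pvFlag b = true) ∨ (pvFlag a = pvFlag b ∧ a < b)) := by
  unfold pvPrecedes pvFlag
  cases ha : PySem.Str.startswith a "." <;> cases hb : PySem.Str.startswith b "." <;> simp [ha, hb]

theorem pvPrecedes_irrefl (a : String) : pvPrecedes a a = false := by
  simp [pvPrecedes]

theorem pvAntisymm (a b : String) (h1 : pvPrecedes a b = false) (h2 : pvPrecedes b a = false) :
    a = b := by
  rw [Bool.eq_false_iff, Ne, pvPrecedes_iff] at h1 h2
  push_neg at h1 h2
  rcases Bool.eq_false_or_eq_true (pvFlag a) with hfa | hfa <;>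
    rcases Bool.eq_false_or_eq_true (pvFlag b) with hfb | hfb
  · exact le_antisymm (not_lt.mp (h2.2 (hfb.trans hfa.symm))) (not_lt.mp (h1.2 (hfa.trans hfb.symm)))
  · exact (h2.1 hfb hfa).elim
  · exact (h1.1 hfa hfb).elim
  · exact le_antisymm (not_lt.mp (h2.2 (hfb.trans hfa.symm))) (not_lt.mp (h1.2 (hfa.trans hfb.symm)))

theorem pvTrans (a b c : String) (h1 : pvPrecedes a b = true) (h2 : pvPrecedes b c = true) :
    pvPrecedes a c = true := by
  rw [pvPrecedes_iff] at *
  rcases h1 with ⟨ha, hb⟩ | ⟨hab, hlt1⟩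
  · rcases h2 with ⟨hb', hc⟩ | ⟨hbc, hlt2⟩
    · rw [hb] at hb'; exact absurd hb' (by simp)
    · exact Or.inl ⟨ha, hbc ▸ hb⟩
  · rcases h2 with ⟨hb', hc⟩ | ⟨hbc, hlt2⟩
    · exact Or.inl ⟨hab.trans hb', hc⟩
    · exact Or.inr ⟨hab.trans hbc, lt_trans hlt1 hlt2⟩

theorem pvTotal (a b c : String) (h : pvPrecedes a c = true) :
    pvPrecedes a b = true ∨ pvPrecedes b c = true := by
  rw [pvPrecedes_iff, pvPrecedes_iff]
  rw [pvPrecedes_iff] at h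
  rcases h with ⟨ha, hc⟩ | ⟨hac, hlt⟩
  · rcases Bool.eq_false_or_eq_true (pvFlag b) with hb | hb
    · exact Or.inl (Or.inl ⟨ha, hb⟩)
    · exact Or.inr (Or.inl ⟨hb, hc⟩)
  · by_cases hfb : pvFlag b = pvFlag a
    · rcases lt_or_ge a b with h1 | h1
      · exact Or.inl (Or.inr ⟨hfb.symm, h1⟩)
      · exact Or.inr (Or.inr ⟨hfb.trans hac, lt_of_le_of_lt h1 hlt⟩)
    · rcases Bool.eq_false_or_eq_true (pvFlag a) with hfa | hfa
      · rcases Bool.eq_false_or_eq_true (pvFlag b) with hb | hb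
        · exact absurd (hb.trans hfa.symm) hfb
        · exact Or.inr (Or.inl ⟨hb, hac ▸ hfa⟩)
      · rcases Bool.eq_false_or_eq_true (pvFlag b) with hb | hb
        · exact Or.inl (Or.inl ⟨hfa, hb⟩)
        · exact absurd (hb.trans hfa.symm) hfb

theorem pvScan_spec (l : List String) : ∀ best : String,
    ((pvScan best l).1 :: (pvScan best l).2).Perm (best :: l) ∧
    ∀ y ∈ best :: l, pvPrecedes y (pvScan best l).1 = false := by
  induction l with
  | nil =>
    intro best
    refine ⟨List.Perm.refl _, ?_⟩
    intro y hy
    simp at hy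
    simpa [hy] using pvPrecedes_irrefl best
  | cons q qs ih =>
    intro best
    by_cases hq : pvPrecedes q best = true
    · obtain ⟨hperm, hmin⟩ := ih q
      simp only [pvScan, hq, if_true]
      constructor
      · exact (List.Perm.swap best (pvScan q qs).1 (pvScan q qs).2).trans (hperm.cons best)
      · intro y hy
        rcases List.mem_cons.mp hy with rfl | hy'
        · by_contra hb
          rw [Bool.not_eq_false] at hb
          have := pvTrans q y (pvScan q qs).1 hq hb
          rw [hmin q (by simp)] at this
          exact absurd this (by simp)
        · exact hmin y hy'
    · obtain ⟨hperm, hmin⟩ := ih best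
      simp only [pvScan, hq]
      constructor
      · exact ((List.Perm.swap q (pvScan best qs).1 (pvScan best qs).2).trans
          (hperm.cons q)).trans (List.Perm.swap best q qs)
      · intro y hy
        rcases List.mem_cons.mp hy with rfl | hy'
        · exact hmin y (by simp)
        · rcases List.mem_cons.mp hy' with rfl | hy''
          · by_contra hb
            rw [Bool.not_eq_false] at hb
            rcases pvTotal y best (pvScan best qs).1 hb with h | h
            · exact absurd h (by simp [hq])
            · rw [hmin best (by simp)] at h; exact absurd h (by simp)
          · exact hmin y (by simp [hy''])

-- the sequence of selected minima, abstracted from the while loop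
def pvSel : List String → List String
  | [] => []
  | p :: ps => (pvScan p ps).1 :: pvSel (pvScan p ps).2
termination_by l => l.length
decreasing_by simpa [pvScan_len] using Nat.lt_succ_self ps.length

def pvLe (a b : String) : Prop := pvPrecedes b a = false

theorem pvSel_perm (l : List String) : (pvSel l).Perm l := by
  induction l using pvSel.induct with
  | case1 => simp [pvSel]
  | case2 p ps ih =>
    rw [pvSel]
    exact (List.Perm.cons _ ih).trans (pvScan_spec ps p).1

theorem pvSel_pairwise (l : List String) : (pvSel l).Pairwise pvLe := by
  induction l using pvSel.induct with
  | case1 => simp [pvSel]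
  | case2 p ps ih =>
    rw [pvSel]
    refine List.Pairwise.cons ?_ ih
    intro y hy
    have hy1 : y ∈ (pvScan p ps).2 := (pvSel_perm _).mem_iff.mp hy
    have hy2 : y ∈ p :: ps := (pvScan_spec ps p).1.mem_iff.mp (by simp [hy1])
    exact (pvScan_spec ps p).2 y hy2

-- A's ordered list (with A's own predicates)
def pvL (ps : List String) : List String :=
  PySem.List.sorted (ps.filter (fun part => !(PySem.Str.startswith part "."))) (fun x => x) ++
  PySem.List.sorted (ps.filter (fun part => PySem.Str.startswith part ".")) (fun x => x)

theorem pvL_perm (ps : List String) : (pvL ps).Perm ps := by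
  unfold pvL
  refine ((PySem.List.sorted_perm _ _ _).append (PySem.List.sorted_perm _ _ _)).trans ?_
  simpa [Bool.not_not] using
    List.filter_append_perm (fun part => !(PySem.Str.startswith part ".")) ps

theorem pvLe_of_le_of_flag_eq (a b : String) (hf : pvFlag a = pvFlag b) (hle : a ≤ b) :
    pvLe a b := by
  unfold pvLe
  by_contra hb
  rw [Bool.not_eq_false, pvPrecedes_iff] at hb
  rcases hb with ⟨h1, h2⟩ | ⟨h1, h2⟩
  · rw [← hf, h2] at h1; exact absurd h1 (by simp)
  · exact absurd h2 (not_lt_of_ge hle)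

theorem pvL_pairwise (ps : List String) : (pvL ps).Pairwise pvLe := by
  unfold pvL
  rw [List.pairwise_append]
  refine ⟨?_, ?_, ?_⟩
  · refine List.Pairwise.imp_of_mem ?_ (PySem.List.sorted_pairwise _ (fun x => x))
    intro a b ha hb hle
    have ha' := List.of_mem_filter ((PySem.List.mem_sorted _ _ _ _).mp ha)
    have hb' := List.of_mem_filter ((PySem.List.mem_sorted _ _ _ _).mp hb)
    simp only [Bool.not_eq_true'] at ha' hb'
    exact pvLe_of_le_of_flag_eq a b (by unfold pvFlag; rw [ha', hb']) hle
  · refine List.Pairwise.imp_of_mem ?_ (PySem.List.sorted_pairwise _ (fun x => x))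
    intro a b ha hb hle
    have ha' := List.of_mem_filter ((PySem.List.mem_sorted _ _ _ _).mp ha)
    have hb' := List.of_mem_filter ((PySem.List.mem_sorted _ _ _ _).mp hb)
    exact pvLe_of_le_of_flag_eq a b (by unfold pvFlag; rw [ha', hb']) hle
  · intro a ha b hb
    have ha' := List.of_mem_filter ((PySem.List.mem_sorted _ _ _ _).mp ha)
    have hb' := List.of_mem_filter ((PySem.List.mem_sorted _ _ _ _).mp hb)
    simp only [Bool.not_eq_true'] at ha'
    unfold pvLe
    rw [Bool.eq_false_iff, Ne, pvPrecedes_iff]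
    rintro (⟨h1, h2⟩ | ⟨h1, h2⟩)
    · exact absurd h2 (by unfold pvFlag; rw [ha']; simp)
    · rw [show pvFlag b = true from by unfold pvFlag; exact hb'] at h1
      exact absurd h1.symm (by unfold pvFlag; rw [ha']; simp)

theorem pvSel_eq_pvL (ps : List String) : pvSel ps = pvL ps := by
  refine List.eq_of_perm_of_sorted ?_ (pvSel_pairwise ps) (pvL_pairwise ps)
    ((pvSel_perm ps).trans (pvL_perm ps).symm)
  intro a b _ _ h1 h2
  exact pvAntisymm a b h2 h1

-- the join accumulator of the while loop, separated from the selection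
def pvFoldJoin (out : String) (l : List String) : String :=
  l.foldl (fun o b => if o = "" then b else pvCat (pvCat o " | ") b) out

theorem pvWhile_eq (ps : List String) : ∀ out, pvWhile out ps = pvFoldJoin out (pvSel ps) := by
  induction ps using pvSel.induct with
  | case1 => intro out; simp [pvWhile, pvSel, pvFoldJoin]
  | case2 p ps ih =>
    intro out
    rw [pvWhile, pvSel]
    simp only [pvFoldJoin, List.foldl_cons]
    exact ih _

theorem pvJoin_cons_flat (sep : List Char) :
    ∀ (rest : List (List Char)) (c : List Char),
      PySem.Chars.join sep (c :: rest) = c ++ rest.flatMap (fun d => sep ++ d) := by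
  intro rest
  induction rest with
  | nil => intro c; simp [PySem.Chars.join_singleton]
  | cons d rest ih =>
    intro c
    rw [PySem.Chars.join_cons_cons, ih d]
    simp [List.flatMap_cons, List.append_assoc]

theorem pvFoldJoin_toList (t : List String) :
    ∀ x : String, x ≠ "" →
      (pvFoldJoin x t).toList =
        x.toList ++ (t.map String.toList).flatMap (fun d => (" | ").toList ++ d) := by
  induction t with
  | nil => intro x _; simp [pvFoldJoin]
  | cons b t ih =>
    intro x hx
    have hxl : x.toList ≠ [] := fun h => hx (String.toList_eq_nil_iff.mp h)
    have hstep : (if x = "" then b else pvCat (pvCat x " | ") b) = pvCat (pvCat x " | ") b := by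
      simp [hx]
    have hcat : (pvCat (pvCat x " | ") b).toList = x.toList ++ (" | ").toList ++ b.toList := by
      simp [pvCat, String.toList_ofList]
    have hne : pvCat (pvCat x " | ") b ≠ "" := by
      intro h
      have := String.toList_eq_nil_iff.mpr h
      rw [hcat] at this
      simp at this
    show (pvFoldJoin (if x = "" then b else pvCat (pvCat x " | ") b) t).toList = _
    rw [hstep, ih _ hne, hcat]
    simp [List.append_assoc]

theorem pvFoldJoin_join (l : List String) (h : ∀ s ∈ l, s ≠ "") :
    pvFoldJoin "" l = PySem.Str.join " | " l := by
  cases l with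
  | nil =>
    apply String.ext
    simp [pvFoldJoin, PySem.Str.toList_join, PySem.Chars.join_nil]
  | cons b t =>
    apply String.ext
    have hstep : pvFoldJoin "" (b :: t) = pvFoldJoin b t := by
      simp [pvFoldJoin]
    rw [hstep, pvFoldJoin_toList t b (h b (by simp)), PySem.Str.toList_join,
      List.map_cons, pvJoin_cons_flat]

-- A's branch structure equals the selection loop, for any nonempty-element parts list
theorem pvMain (P : List String) (hne : ∀ s ∈ P, s ≠ "") :
    (if P = [] then ""
     else if P.length = 1 then (PySem.List.pyGet? P 0).getD ""
     else PySem.Str.join " | " (pvL P)) = pvWhile "" P := by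
  match P with
  | [] => simp [pvWhile]
  | [p] =>
    simp [pvWhile, pvScan, PySem.List.pyGet?, PySem.List.pyIdx?]
  | p :: q :: t =>
    have hlen : (p :: q :: t).length ≠ 1 := by simp
    simp only [reduceCtorEq, if_false, hlen]
    rw [pvWhile_eq, pvSel_eq_pvL, pvFoldJoin_join]
    intro s hs
    exact hne s ((pvL_perm (p :: q :: t)).mem_iff.mp hs)

-- ===== VERDICT (by name: the statement is the Claim_ definition above) =====
theorem canonicalize_domain_filter_value_spec : Claim_equal_canonicalize_domain_filter_value := by
  intro value _
  unfold Spec_canonicalize_domain_filter_value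
  unfold canonicalize_domain_filter_value canonicalize_domain_filter_value_alt
  by_cases hv : value = ""
  · simp [hv]
  · simp only [hv, if_false]
    set l := (PySem.Str.split? value "|").getD [] with hl
    have hfold : l.foldl
        (fun acc raw =>
          let p := PySem.Str.lower (PySem.Str.strip raw)
          if p = "" then acc else acc ++ [p]) [] =
        (l.map (fun part => PySem.Str.lower (PySem.Str.strip part))).filter
          (fun part => !(part == "")) := by
      have hbody : (fun (acc : List String) raw =>
          let p := PySem.Str.lower (PySem.Str.strip raw)
          if p = "" then acc else acc ++ [p]) =
          (fun acc raw =>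
            if (!(PySem.Str.lower (PySem.Str.strip raw) == "")) = true then
              acc ++ [PySem.Str.lower (PySem.Str.strip raw)] else acc) := by
        funext acc raw
        by_cases h : PySem.Str.lower (PySem.Str.strip raw) = "" <;> simp [h]
      rw [hbody, PySem.List.foldl_append_if, List.filter_map]
      simp only [Function.comp_def, List.nil_append]
    rw [hfold]
    set P := (l.map (fun part => PySem.Str.lower (PySem.Str.strip part))).filter
      (fun part => !(part == "")) with hP
    have hne : ∀ s ∈ P, s ≠ "" := by
      intro s hs
      have := List.of_mem_filter hs
      simpa using this
    simpa [pvL] using pvMain P hne
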